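-- pv_equiv track=rewrite | github.com/DimitrisJim/leetcode_solutions | Python/Algorithms/1103.py | best_guess_k
-- ===== SOURCE A (Python) =====
-- def best_guess_k(c, n):
--     """
--     Basically, tries to increase k faster when
--     c is a really large value.
--     """
--     # local look-ups
--     range_, sum_, k = range, sum, 0
--     # try and increase k faster:
--     if c <= 100:
--         return 0
--     if c <= 1000:
--         ammount = 2
--     elif c <= 100000:
--         ammount = 10
--     elif c <= 10_000_000:
--         ammount = 50
--     else:
--         ammount = 250
--     k = 0
--     while True:
--         sumk = sum_(
--             ((k + 1) * i + (((k * (k + 1)) >> 1) * n))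
--             for i in range_(1, n+1)
--         )
--         if sumk < c:
--             k = k + ammount
--         else:
--             k = k - ammount
--             break
--     return k
-- ===== SOURCE B (Python) =====
-- def best_guess_k(c, n):
--     """
--     Binary search over multiples of the step using the closed-form
--     value of the quadratic sum, instead of scanning step by step.
--     """
--     if c <= 100:
--         return 0
--     if c <= 1000:
--         step = 2
--     elif c <= 100000:
--         step = 10
--     elif c <= 10_000_000:
--         step = 50
--     else:
--         step = 250
--     t = n * (n + 1) // 2
--
--     def f(k):
--         return (k + 1) * t + (k * (k + 1) // 2) * n * n
--
--     if f(0) >= c: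
--         return -step
--     # For n >= 1 we have f(k) >= k + 1, so f(c * step) >= c: use c as the
--     # upper bound on the multiplier and binary search for the first multiple
--     # of step whose sum reaches c.
--     lo, hi = 0, c
--     while hi - lo > 1:
--         mid = (lo + hi) // 2
--         if f(mid * step) < c:
--             lo = mid
--         else:
--             hi = mid
--     return lo * step
-- ===== Notes on version B (the rewrite author's own statement) =====
-- stated objective: faster
-- what changed: B replaces A's step-by-step scan, which recomputes the quadratic sum by an O(n) summation at every step, with the closed-form sum and a binary search over multiples of the step; Pre_ excludes c > 100 with n <= 0, where A's while-loop never terminates (the inner range is empty so sumk stays 0 < c).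
import Mathlib
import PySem

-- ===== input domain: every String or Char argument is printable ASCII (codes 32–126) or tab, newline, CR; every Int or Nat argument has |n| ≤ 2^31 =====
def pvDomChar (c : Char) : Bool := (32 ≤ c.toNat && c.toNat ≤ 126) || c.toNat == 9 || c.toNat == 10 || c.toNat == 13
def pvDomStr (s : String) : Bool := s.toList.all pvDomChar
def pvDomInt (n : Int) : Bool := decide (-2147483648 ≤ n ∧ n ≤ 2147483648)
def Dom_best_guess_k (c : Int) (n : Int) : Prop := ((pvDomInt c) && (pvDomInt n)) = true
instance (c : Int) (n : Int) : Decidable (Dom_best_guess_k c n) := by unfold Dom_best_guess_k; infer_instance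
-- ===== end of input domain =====

-- B replaces A's step-by-step scan (recomputing the quadratic sum by an O(n) summation
-- at every step) with the closed-form sum and a binary search over multiples of the step.

-- ===== PORT A =====
-- the per-step summation: sum(((k+1)*i + (((k*(k+1)) >> 1) * n)) for i in range(1, n+1));
-- Python's 'x >> 1' is floor division by 2, ported exactly as PySem.Int.floordiv x 2
def pvSumA (n k : Int) : Int :=
  ((PySem.List.pyRange 1 (n + 1) 1).map
    (fun i => (k + 1) * i + (PySem.Int.floordiv (k * (k + 1)) 2) * n)).sum

-- the 'while True' loop; fuel only makes it total (the loop diverges in Python when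
-- n ≤ 0 and c > 100, which Pre_ excludes; fuel sufficiency is proved under Pre_)
def pvALoop (c n a : Int) (k : Int) : Nat → Int
  | 0 => k
  | fuel + 1 =>
    if pvSumA n k < c then pvALoop c n a (k + a) fuel
    else k - a

def best_guess_k (c : Int) (n : Int) : Int :=
  if c ≤ 100 then 0
  else
    let a : Int :=
      if c ≤ 1000 then 2
      else if c ≤ 100000 then 10
      else if c ≤ 10000000 then 50
      else 250
    pvALoop c n a 0 (c.toNat + 1)

-- ===== PORT B =====
def pvT (n : Int) : Int := PySem.Int.floordiv (n * (n + 1)) 2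

-- the closure f(k) = (k+1)*t + (k*(k+1)//2)*n*n
def pvF (n t k : Int) : Int :=
  (k + 1) * t + PySem.Int.floordiv (k * (k + 1)) 2 * n * n

-- the binary-search loop; terminates on (hi - lo).toNat
def pvBSearch (c n t s : Int) (lo hi : Int) : Int :=
  if 1 < hi - lo then
    let mid := PySem.Int.floordiv (lo + hi) 2
    if pvF n t (mid * s) < c then pvBSearch c n t s mid hi
    else pvBSearch c n t s lo mid
  else lo * s
termination_by (hi - lo).toNat
decreasing_by
  all_goals
    simp only [PySem.Int.floordiv_eq_ediv_of_pos (by norm_num : (0:Int) < 2)]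
    omega

def best_guess_k_alt (c : Int) (n : Int) : Int :=
  if c ≤ 100 then 0
  else
    let s : Int :=
      if c ≤ 1000 then 2
      else if c ≤ 100000 then 10
      else if c ≤ 10000000 then 50
      else 250
    let t := pvT n
    if pvF n t 0 ≥ c then -s
    else pvBSearch c n t s 0 c

-- ===== PRECONDITION & SPEC =====
-- Pre_ excludes c > 100 with n ≤ 0: there A's while-loop never reaches c (the inner
-- range is empty, sumk = 0 < c forever) and Python A diverges, returning nothing.
def Pre_best_guess_k (c : Int) (n : Int) : Prop := c ≤ 100 ∨ 1 ≤ n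
instance (c : Int) (n : Int) : Decidable (Pre_best_guess_k c n) := by
  unfold Pre_best_guess_k; infer_instance

def pvWitness_best_guess_k : Int × Int := (200, 3)

def Spec_best_guess_k (c : Int) (n : Int) (out : Int) : Prop := out = best_guess_k_alt c n
instance (c : Int) (n : Int) (out : Int) : Decidable (Spec_best_guess_k c n out) := by
  unfold Spec_best_guess_k; infer_instance

-- ===== CLAIM (what is proved, stated in full; the proofs are below) =====
def Claim_equal_best_guess_k : Prop :=
  ∀ (c : Int) (n : Int), Dom_best_guess_k c n → Pre_best_guess_k c n →
    Spec_best_guess_k c n (best_guess_k c n)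

-- ===== LEMMAS AND PROOFS =====

-- k*(k+1) is even, so the floor-halving is exact
lemma pvHalf_mul (k : Int) : 2 * PySem.Int.floordiv (k * (k + 1)) 2 = k * (k + 1) := by
  obtain ⟨r, hr⟩ := Int.even_mul_succ_self k
  rw [PySem.Int.floordiv_eq_ediv_of_pos (by norm_num : (0:Int) < 2)]
  omega

lemma pvT_two (n : Int) : 2 * pvT n = n * (n + 1) := pvHalf_mul n

-- the summation A computes equals the closed form B computes
lemma pvSumA_aux (C k : Int) : ∀ (m : Nat),
    2 * (((PySem.List.pyRange 1 ((m : Int) + 1) 1).map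
      (fun i => (k + 1) * i + C)).sum) = (k + 1) * m * (m + 1) + 2 * C * m := by
  intro m
  induction m with
  | zero => simp
  | succ p ih =>
    have h1 : ((p + 1 : Nat) : Int) + 1 = ((p : Int) + 1) + 1 := by push_cast; ring
    rw [h1, PySem.List.pyRange_one_succ_right (by omega : (1:Int) ≤ (p : Int) + 1)]
    rw [List.map_append, List.sum_append]
    simp only [List.map_cons, List.map_nil, List.sum_cons, List.sum_nil]
    push_cast
    push_cast at ih
    linear_combination ih

lemma pvSumA_eq (k : Int) {n : Int} (hn : 0 ≤ n) : pvSumA n k = pvF n (pvT n) k := by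
  have h2 : 2 * pvSumA n k = 2 * pvF n (pvT n) k := by
    unfold pvSumA pvF
    have hm : n = ((n.toNat : Nat) : Int) := by omega
    rw [hm]
    rw [pvSumA_aux ((PySem.Int.floordiv (k * (k + 1)) 2) * n.toNat) k n.toNat]
    have ht := pvT_two n
    rw [hm] at ht
    linear_combination (-(k + 1)) * ht
  exact mul_left_cancel₀ two_ne_zero h2

-- pvF is monotone (and strictly so) in k on k ≥ 0, for n ≥ 1 and the exact half t
lemma pvF_le {n t : Int} (k k' : Int) (hn : 1 ≤ n) (ht : 2 * t = n * (n + 1))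
    (hk : 0 ≤ k) (hkk : k ≤ k') : pvF n t k ≤ pvF n t k' := by
  have h1 := pvHalf_mul k
  have h2 := pvHalf_mul k'
  have ht1 : 1 ≤ t := by nlinarith
  have hH : PySem.Int.floordiv (k * (k + 1)) 2 ≤ PySem.Int.floordiv (k' * (k' + 1)) 2 := by
    nlinarith
  unfold pvF
  nlinarith [sq_nonneg n, mul_nonneg (mul_nonneg (sub_nonneg.2 hH) (by linarith : (0:Int) ≤ n)) (by linarith : (0:Int) ≤ n)]

lemma pvF_ge {n t : Int} (k : Int) (hn : 1 ≤ n) (ht : 2 * t = n * (n + 1))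
    (hk : 0 ≤ k) : k + 1 ≤ pvF n t k := by
  have h1 := pvHalf_mul k
  have ht1 : 1 ≤ t := by nlinarith
  have hH : 0 ≤ PySem.Int.floordiv (k * (k + 1)) 2 := by nlinarith
  unfold pvF
  nlinarith [mul_nonneg (mul_nonneg hH (by linarith : (0:Int) ≤ n)) (by linarith : (0:Int) ≤ n)]

-- A's loop reaches the first multiple m*a with pvF ≥ c and returns (m-1)*a
lemma pvALoop_eq (c n a : Int) (hn : 1 ≤ n)
    (hex : ∃ j : Nat, c ≤ pvF n (pvT n) ((j : Int) * a)) :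
    ∀ (fuel : Nat) (j : Nat), j ≤ Nat.find hex → Nat.find hex - j < fuel →
      pvALoop c n a ((j : Int) * a) fuel = (Nat.find hex : Int) * a - a := by
  intro fuel
  induction fuel with
  | zero => intro j _ h; omega
  | succ f ih =>
    intro j hj hf
    simp only [pvALoop]
    rw [pvSumA_eq _ (by omega : (0:Int) ≤ n)]
    by_cases hlt : pvF n (pvT n) ((j : Int) * a) < c
    · rw [if_pos hlt]
      have hjm : j < Nat.find hex := by
        rcases Nat.lt_or_ge j (Nat.find hex) with h | h
        · exact h
        · exfalso
          have hje : j = Nat.find hex := le_antisymm hj h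
          have := Nat.find_spec hex
          rw [← hje] at this
          omega
      have harith : (j : Int) * a + a = ((j + 1 : Nat) : Int) * a := by push_cast; ring
      rw [harith, ih (j + 1) (by omega) (by omega)]
    · rw [if_neg hlt]
      have hm : Nat.find hex ≤ j := Nat.find_min' hex (by omega)
      have hje : j = Nat.find hex := le_antisymm (le_of_not_gt (by omega)) hm
      rw [hje]

-- B's binary search returns the same value, (m-1)*a for the same first multiple m
lemma pvBSearch_eq (c n t s : Int) (hn : 1 ≤ n) (ht : 2 * t = n * (n + 1)) (hs : 0 < s)
    (hex : ∃ j : Nat, c ≤ pvF n t ((j : Int) * s)) :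
    ∀ (d : Nat) (lo hi : Int), (hi - lo).toNat ≤ d → 0 ≤ lo → lo < hi →
      pvF n t (lo * s) < c → c ≤ pvF n t (hi * s) →
      pvBSearch c n t s lo hi = ((Nat.find hex : Int) - 1) * s := by
  intro d
  induction d with
  | zero => intro lo hi hd _ hlh _ _; omega
  | succ p ih =>
    intro lo hi hd hlo hlh hflo hfhi
    rw [pvBSearch]
    by_cases hgap : 1 < hi - lo
    · rw [if_pos hgap]
      have hmid : 2 * PySem.Int.floordiv (lo + hi) 2 ≤ lo + hi ∧
          lo + hi < 2 * PySem.Int.floordiv (lo + hi) 2 + 2 := by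
        rw [PySem.Int.floordiv_eq_ediv_of_pos (by norm_num : (0:Int) < 2)]
        omega
      set mid := PySem.Int.floordiv (lo + hi) 2 with hmiddef
      have hb1 : lo < mid := by omega
      have hb2 : mid < hi := by omega
      by_cases hf : pvF n t (mid * s) < c
      · rw [if_pos hf]
        exact ih mid hi (by omega) (by omega) hb2 hf hfhi
      · rw [if_neg hf]
        exact ih lo mid (by omega) hlo hb1 hflo (by omega)
    · rw [if_neg hgap]
      -- hi = lo + 1: lo is exactly (m - 1)
      have hhi : hi = lo + 1 := by omega
      have hup : Nat.find hex ≤ lo.toNat + 1 := by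
        apply Nat.find_min' hex
        have : ((lo.toNat + 1 : Nat) : Int) = hi := by omega
        rw [this]; exact hfhi
      have hlow : lo.toNat < Nat.find hex := by
        by_contra hcon
        push_neg at hcon
        have hspec := Nat.find_spec hex
        have hmle : ((Nat.find hex : Nat) : Int) * s ≤ lo * s := by
          have : ((Nat.find hex : Nat) : Int) ≤ lo := by omega
          exact mul_le_mul_of_nonneg_right this (le_of_lt hs)
        have hmono := pvF_le (((Nat.find hex : Nat) : Int) * s) (lo * s) hn ht
          (mul_nonneg (Int.natCast_nonneg _) hs.le) hmle
        linarith
      have : lo = (Nat.find hex : Int) - 1 := by omega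
      rw [this]

-- ===== VERDICT (by name: the statement is the Claim_ definition above) =====
theorem best_guess_k_spec : Claim_equal_best_guess_k := by
  intro c n _ hpre
  unfold Spec_best_guess_k best_guess_k best_guess_k_alt
  by_cases hc : c ≤ 100
  · simp [hc]
  · rw [if_neg hc, if_neg hc]
    have hn : 1 ≤ n := by
      rcases hpre with h | h
      · omega
      · exact h
    set a : Int := if c ≤ 1000 then 2 else if c ≤ 100000 then 10
      else if c ≤ 10000000 then 50 else 250 with hadef
    have ha : 2 ≤ a := by rw [hadef]; split_ifs <;> norm_num
    have ht := pvT_two n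
    have hca : c ≤ c * a := by nlinarith
    have hfc : c ≤ pvF n (pvT n) (c * a) := by
      have := pvF_ge (n := n) (t := pvT n) (c * a) hn ht (by nlinarith)
      linarith
    have hex : ∃ j : Nat, c ≤ pvF n (pvT n) ((j : Int) * a) := by
      refine ⟨c.toNat, ?_⟩
      have : ((c.toNat : Nat) : Int) = c := by omega
      rw [this]; exact hfc
    by_cases h0 : pvF n (pvT n) 0 ≥ c
    · rw [if_pos h0]
      show pvALoop c n a 0 (c.toNat + 1) = -a
      simp only [pvALoop]
      rw [pvSumA_eq _ (by omega : (0:Int) ≤ n)]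
      rw [if_neg (by omega)]
      ring
    · rw [if_neg h0]
      push_neg at h0
      have hB := pvBSearch_eq c n (pvT n) a hn ht (by omega) hex
        (c - 0).toNat 0 c (by omega) (by omega) (by omega)
        (by rw [zero_mul]; exact h0) hfc
      rw [hB]
      have hA := pvALoop_eq c n a hn hex (c.toNat + 1) 0
        (by omega)
        (by
          have : Nat.find hex ≤ c.toNat := Nat.find_min' hex (by
            have : ((c.toNat : Nat) : Int) = c := by omega
            rw [this]; exact hfc)
          omega)
      rw [Nat.cast_zero, zero_mul] at hA
      rw [hA]
      ring
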